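-- pv_equiv track=rewrite | github.com/wwan-dev/FIT5136_deadline | src/utils/date_util.py | hex_to_time_slots
-- ===== SOURCE A (Python) =====
-- from typing import List, Dict, Tuple
--
-- def hex_to_time_slots(hex_str: str) -> List[int]:
--     """Convert hexadecimal string to time slot list
--
--     Args:
--         hex_str (str): Hexadecimal string
--
--     Returns:
--         List[int]: List of time slot indices (1-16)
--     """
--     if not hex_str or hex_str == "0":
--         return []
--
--     try:
--         value = int(hex_str, 16)
--         slots = []
--
--         for i in range(16):
--             if value & (1 << i):
--                 # Since bits are 0-15 and time slots are 1-16, need to add 1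
--                 slots.append(i + 1)
--
--         return slots
--     except ValueError:
--         return []
-- ===== SOURCE B (Python) =====
-- # Table-driven: decode the 16-bit mask nibble by nibble with a precomputed
-- # 16-entry table of 1-based bit positions, offset by 4 per nibble.
-- _NIBBLE_BITS = ([], [1], [2], [1, 2], [3], [1, 3], [2, 3], [1, 2, 3],
--                 [4], [1, 4], [2, 4], [1, 2, 4], [3, 4], [1, 3, 4],
--                 [2, 3, 4], [1, 2, 3, 4])
--
--
-- def hex_to_time_slots(hex_str):
--     if not hex_str or hex_str == "0":
--         return []
--     try:
--         v = int(hex_str, 16) & 0xFFFF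
--     except ValueError:
--         return []
--     slots = []
--     for j in range(4):
--         nib = (v >> (4 * j)) & 0xF
--         slots += [b + 4 * j for b in _NIBBLE_BITS[nib]]
--     return slots
-- ===== Notes on version B (the rewrite author's own statement) =====
-- stated objective: alternative
-- what changed: Replaced the 16-iteration per-bit test loop with a table-driven decode: mask the value to 16 bits once, then decode it nibble by nibble (4 iterations) via a precomputed 16-entry table of 1-based bit positions, offsetting each table entry by 4 per nibble.
import Mathlib
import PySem

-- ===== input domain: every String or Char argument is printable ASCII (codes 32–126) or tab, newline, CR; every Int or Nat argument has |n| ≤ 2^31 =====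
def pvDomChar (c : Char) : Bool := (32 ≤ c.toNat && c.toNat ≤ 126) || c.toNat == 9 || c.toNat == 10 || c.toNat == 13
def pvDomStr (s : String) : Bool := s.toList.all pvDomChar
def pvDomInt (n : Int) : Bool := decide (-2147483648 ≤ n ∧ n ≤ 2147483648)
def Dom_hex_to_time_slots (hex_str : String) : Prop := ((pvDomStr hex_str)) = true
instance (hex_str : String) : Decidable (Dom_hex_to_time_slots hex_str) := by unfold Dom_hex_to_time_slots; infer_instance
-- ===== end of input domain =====

-- B replaces A's 16-round bit-testing loop by a table-driven nibble decode (4 rounds over a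
-- precomputed 16-entry table of 1-based bit positions); objective: alternative algorithm, not speed.

-- ===== PORT A =====
def hex_to_time_slots (hex_str : String) : List Int :=
  if hex_str = "" ∨ hex_str = "0" then []
  else
    match PySem.Int.ofStrBase? hex_str 16 with
    | none => []      -- except ValueError: return []
    | some value =>
      (PySem.List.pyRange 0 16 1).foldl
        (fun slots i => if PySem.Int.band value (1 <<< i.toNat) ≠ 0 then slots ++ [i + 1] else slots) []

-- ===== PORT B =====
def NIBBLE_BITS : List (List Int) :=
  [[], [1], [2], [1,2], [3], [1,3], [2,3], [1,2,3],
   [4], [1,4], [2,4], [1,2,4], [3,4], [1,3,4], [2,3,4], [1,2,3,4]]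

-- `_NIBBLE_BITS[nib]` is ported as `(pyGet? …).getD []`; nib always satisfies 0 ≤ nib < 16,
-- so the `.getD []` default is never taken and the port is exact.
def hex_to_time_slots_alt (hex_str : String) : List Int :=
  if hex_str = "" ∨ hex_str = "0" then []
  else
    match PySem.Int.ofStrBase? hex_str 16 with
    | none => []      -- except ValueError: return []
    | some value =>
      let v := PySem.Int.band value 65535
      (PySem.List.pyRange 0 4 1).foldl
        (fun slots j =>
          let nib := PySem.Int.band (v >>> (4 * j).toNat) 15
          slots ++ ((PySem.List.pyGet? NIBBLE_BITS nib).getD []).map (fun b => b + 4 * j)) []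

-- ===== PRECONDITION & SPEC =====
def Spec_hex_to_time_slots (hex_str : String) (out : List Int) : Prop := out = hex_to_time_slots_alt hex_str
instance (hex_str : String) (out : List Int) : Decidable (Spec_hex_to_time_slots hex_str out) := by unfold Spec_hex_to_time_slots; infer_instance

-- ===== CLAIM (what is proved, stated in full; the proofs are below) =====
def Claim_equal_hex_to_time_slots : Prop := ∀ (hex_str : String), Dom_hex_to_time_slots hex_str → Spec_hex_to_time_slots hex_str (hex_to_time_slots hex_str)

-- ===== LEMMAS AND PROOFS =====

theorem band_pos_nonneg (N : Nat) (b : Int) (hb : 0 ≤ b) :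
    PySem.Int.band (Int.ofNat N) b = ((N &&& b.toNat : Nat) : Int) := by
  unfold PySem.Int.band
  rw [if_pos (by exact Int.natCast_nonneg N), if_pos hb]
  rfl

theorem band_negSucc_nonneg (N : Nat) (b : Int) (hb : 0 ≤ b) :
    PySem.Int.band (Int.negSucc N) b = ((b.toNat - (b.toNat &&& N) : Nat) : Int) := by
  unfold PySem.Int.band
  rw [if_neg (by simp [Int.negSucc_eq]; omega), if_pos hb]
  congr 2
  simp [Int.negSucc_eq]

theorem mask_mod (N : Nat) : N &&& 65535 = N % 65536 := by
  have h := Nat.and_two_pow_sub_one_eq_mod N 16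
  norm_num at h; exact h

theorem mod_testBit (N i : Nat) (hi : i < 16) : (N % 65536).testBit i = N.testBit i := by
  have h := Nat.testBit_mod_two_pow N 16 i
  norm_num [hi] at h; exact h

theorem sub_mask_testBit (N i : Nat) (hi : i < 16) :
    (65535 - N % 65536).testBit i = !N.testBit i := by
  have hx : N % 65536 < 2 ^ 16 := by norm_num [Nat.mod_lt]
  have h := Nat.testBit_two_pow_sub_succ hx i
  rw [show (65535 - N % 65536) = 2 ^ 16 - (N % 65536 + 1) by omega, h, mod_testBit N i hi]
  simp [hi]

theorem cond_pos (N i : Nat) (hi : i < 16) :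
    (PySem.Int.band (Int.ofNat N) ((1 <<< i : Nat) : Int) ≠ 0) = (((N % 65536).testBit i) = true) := by
  rw [band_pos_nonneg N _ (by positivity)]
  have h1 : ((1 <<< i : Nat) : Int).toNat = 2 ^ i := by
    rw [Int.toNat_natCast, Nat.shiftLeft_eq, one_mul]
  rw [h1, Nat.and_two_pow, mod_testBit N i hi]
  rcases h : N.testBit i <;> simp

theorem cond_neg (N i : Nat) (hi : i < 16) :
    (PySem.Int.band (Int.negSucc N) ((1 <<< i : Nat) : Int) ≠ 0)
      = (((65535 - N % 65536).testBit i) = true) := by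
  rw [band_negSucc_nonneg N _ (by positivity)]
  have h1 : ((1 <<< i : Nat) : Int).toNat = 2 ^ i := by
    rw [Int.toNat_natCast, Nat.shiftLeft_eq, one_mul]
  rw [h1, Nat.and_comm, Nat.and_two_pow, sub_mask_testBit N i hi]
  rcases h : N.testBit i <;> simp

theorem nib_pos (N : Nat) (k : Nat) :
    PySem.Int.band ((PySem.Int.band (Int.ofNat N) 65535) >>> ((k : Nat) : Int)) 15
      = Int.ofNat (((N % 65536) >>> k) &&& 15) := by
  rw [band_pos_nonneg N 65535 (by norm_num),
      show (N &&& (65535:Int).toNat) = N % 65536 by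
        rw [show (65535:Int).toNat = 65535 from rfl, mask_mod],
      show (((N % 65536 : Nat) : Int) >>> ((k : Nat) : Int)) = Int.ofNat ((N % 65536) >>> k) by
        cases k <;> rfl,
      band_pos_nonneg _ 15 (by norm_num)]
  rfl

theorem nib_neg (N : Nat) (k : Nat) :
    PySem.Int.band ((PySem.Int.band (Int.negSucc N) 65535) >>> ((k : Nat) : Int)) 15
      = Int.ofNat (((65535 - N % 65536) >>> k) &&& 15) := by
  rw [band_negSucc_nonneg N 65535 (by norm_num),
      show ((65535:Int).toNat - ((65535:Int).toNat &&& N) : Nat) = (65535 - N % 65536 : Nat) by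
        rw [show (65535:Int).toNat = 65535 from rfl, Nat.and_comm, mask_mod],
      show (((65535 - N % 65536 : Nat) : Int) >>> ((k : Nat) : Int)) = Int.ofNat ((65535 - N % 65536) >>> k) by
        cases k <;> rfl,
      band_pos_nonneg _ 15 (by norm_num)]
  rfl

theorem nibbit (M k r : Nat) (hr : r < 4) :
    ((M >>> k) &&& 15).testBit r = M.testBit (k + r) := by
  rw [Nat.testBit_land, show (15:Nat) = 2 ^ 4 - 1 from rfl, Nat.testBit_two_pow_sub_one,
      Nat.testBit_shiftRight]
  simp [hr]

theorem and15_lt (x : Nat) : x &&& 15 < 16 :=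
  lt_of_le_of_lt Nat.and_le_right (by norm_num)

theorem e_pos (N i k r : Nat) (hi : i < 16) (hik : i = k + r) (hr : r < 4) :
    (PySem.Int.band (Int.ofNat N) ((1 <<< i : Nat) : Int) ≠ 0)
      = ((((N % 65536) >>> k) &&& 15).testBit r = true) := by
  rw [cond_pos N i hi, nibbit (N % 65536) k r hr, hik]

theorem e_neg (N i k r : Nat) (hi : i < 16) (hik : i = k + r) (hr : r < 4) :
    (PySem.Int.band (Int.negSucc N) ((1 <<< i : Nat) : Int) ≠ 0)
      = ((((65535 - N % 65536) >>> k) &&& 15).testBit r = true) := by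
  rw [cond_neg N i hi, nibbit (65535 - N % 65536) k r hr, hik]

theorem chunk0 (value : Int) (n : Nat) (hn : n < 16)
    (e0 : (PySem.Int.band value ((1 <<< 0 : Nat) : Int) ≠ 0) = (n.testBit 0 = true))
    (e1 : (PySem.Int.band value ((1 <<< 1 : Nat) : Int) ≠ 0) = (n.testBit 1 = true))
    (e2 : (PySem.Int.band value ((1 <<< 2 : Nat) : Int) ≠ 0) = (n.testBit 2 = true))
    (e3 : (PySem.Int.band value ((1 <<< 3 : Nat) : Int) ≠ 0) = (n.testBit 3 = true))
    (s : List Int) :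
    List.foldl
      (fun slots i => if PySem.Int.band value (1 <<< i.toNat) ≠ 0 then slots ++ [i + 1] else slots) s
      [0, 1, 2, 3]
      = s ++ List.map (fun b => b + 4 * 0) ((PySem.List.pyGet? NIBBLE_BITS (Int.ofNat n)).getD []) := by
  simp only [List.foldl_cons, List.foldl_nil, Int.reduceToNat, Int.reduceAdd]
  simp only [e0, e1, e2, e3]
  interval_cases n <;> simp [Nat.testBit, NIBBLE_BITS, PySem.List.pyGet?, PySem.List.pyIdx?]

theorem chunk1 (value : Int) (n : Nat) (hn : n < 16)
    (e0 : (PySem.Int.band value ((1 <<< 4 : Nat) : Int) ≠ 0) = (n.testBit 0 = true))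
    (e1 : (PySem.Int.band value ((1 <<< 5 : Nat) : Int) ≠ 0) = (n.testBit 1 = true))
    (e2 : (PySem.Int.band value ((1 <<< 6 : Nat) : Int) ≠ 0) = (n.testBit 2 = true))
    (e3 : (PySem.Int.band value ((1 <<< 7 : Nat) : Int) ≠ 0) = (n.testBit 3 = true))
    (s : List Int) :
    List.foldl
      (fun slots i => if PySem.Int.band value (1 <<< i.toNat) ≠ 0 then slots ++ [i + 1] else slots) s
      [4, 5, 6, 7]
      = s ++ List.map (fun b => b + 4 * 1) ((PySem.List.pyGet? NIBBLE_BITS (Int.ofNat n)).getD []) := by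
  simp only [List.foldl_cons, List.foldl_nil, Int.reduceToNat, Int.reduceAdd]
  simp only [e0, e1, e2, e3]
  interval_cases n <;> simp [Nat.testBit, NIBBLE_BITS, PySem.List.pyGet?, PySem.List.pyIdx?]

theorem chunk2 (value : Int) (n : Nat) (hn : n < 16)
    (e0 : (PySem.Int.band value ((1 <<< 8 : Nat) : Int) ≠ 0) = (n.testBit 0 = true))
    (e1 : (PySem.Int.band value ((1 <<< 9 : Nat) : Int) ≠ 0) = (n.testBit 1 = true))
    (e2 : (PySem.Int.band value ((1 <<< 10 : Nat) : Int) ≠ 0) = (n.testBit 2 = true))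
    (e3 : (PySem.Int.band value ((1 <<< 11 : Nat) : Int) ≠ 0) = (n.testBit 3 = true))
    (s : List Int) :
    List.foldl
      (fun slots i => if PySem.Int.band value (1 <<< i.toNat) ≠ 0 then slots ++ [i + 1] else slots) s
      [8, 9, 10, 11]
      = s ++ List.map (fun b => b + 4 * 2) ((PySem.List.pyGet? NIBBLE_BITS (Int.ofNat n)).getD []) := by
  simp only [List.foldl_cons, List.foldl_nil, Int.reduceToNat, Int.reduceAdd]
  simp only [e0, e1, e2, e3]
  interval_cases n <;> simp [Nat.testBit, NIBBLE_BITS, PySem.List.pyGet?, PySem.List.pyIdx?]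

theorem chunk3 (value : Int) (n : Nat) (hn : n < 16)
    (e0 : (PySem.Int.band value ((1 <<< 12 : Nat) : Int) ≠ 0) = (n.testBit 0 = true))
    (e1 : (PySem.Int.band value ((1 <<< 13 : Nat) : Int) ≠ 0) = (n.testBit 1 = true))
    (e2 : (PySem.Int.band value ((1 <<< 14 : Nat) : Int) ≠ 0) = (n.testBit 2 = true))
    (e3 : (PySem.Int.band value ((1 <<< 15 : Nat) : Int) ≠ 0) = (n.testBit 3 = true))
    (s : List Int) :
    List.foldl
      (fun slots i => if PySem.Int.band value (1 <<< i.toNat) ≠ 0 then slots ++ [i + 1] else slots) s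
      [12, 13, 14, 15]
      = s ++ List.map (fun b => b + 4 * 3) ((PySem.List.pyGet? NIBBLE_BITS (Int.ofNat n)).getD []) := by
  simp only [List.foldl_cons, List.foldl_nil, Int.reduceToNat, Int.reduceAdd]
  simp only [e0, e1, e2, e3]
  interval_cases n <;> simp [Nat.testBit, NIBBLE_BITS, PySem.List.pyGet?, PySem.List.pyIdx?]

theorem r16 : PySem.List.pyRange 0 16 1 = [0,1,2,3,4,5,6,7,8,9,10,11,12,13,14,15] := by
  rw [PySem.List.pyRange_one]; rfl

theorem r4 : PySem.List.pyRange 0 4 1 = [0,1,2,3] := by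
  rw [PySem.List.pyRange_one]; rfl

theorem core_eq (value : Int) :
    (PySem.List.pyRange 0 16 1).foldl
      (fun slots i => if PySem.Int.band value (1 <<< i.toNat) ≠ 0 then slots ++ [i + 1] else slots) [] =
    (PySem.List.pyRange 0 4 1).foldl
      (fun slots j =>
        slots ++ ((PySem.List.pyGet? NIBBLE_BITS
          (PySem.Int.band ((PySem.Int.band value 65535) >>> (4 * j).toNat) 15)).getD []).map
            (fun b => b + 4 * j)) [] := by
  rw [r16, r4,
      show ([0,1,2,3,4,5,6,7,8,9,10,11,12,13,14,15] : List Int)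
         = [0,1,2,3] ++ ([4,5,6,7] ++ ([8,9,10,11] ++ [12,13,14,15])) from rfl,
      List.foldl_append, List.foldl_append, List.foldl_append]
  cases value with
  | ofNat N =>
    rw [chunk0 (Int.ofNat N) _ (and15_lt _)
          (e_pos N 0 ((4 * (0 : Int)).toNat) 0 (by norm_num) (by decide) (by norm_num))
          (e_pos N 1 ((4 * (0 : Int)).toNat) 1 (by norm_num) (by decide) (by norm_num))
          (e_pos N 2 ((4 * (0 : Int)).toNat) 2 (by norm_num) (by decide) (by norm_num))
          (e_pos N 3 ((4 * (0 : Int)).toNat) 3 (by norm_num) (by decide) (by norm_num)),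
        chunk1 (Int.ofNat N) _ (and15_lt _)
          (e_pos N 4 ((4 * (1 : Int)).toNat) 0 (by norm_num) (by decide) (by norm_num))
          (e_pos N 5 ((4 * (1 : Int)).toNat) 1 (by norm_num) (by decide) (by norm_num))
          (e_pos N 6 ((4 * (1 : Int)).toNat) 2 (by norm_num) (by decide) (by norm_num))
          (e_pos N 7 ((4 * (1 : Int)).toNat) 3 (by norm_num) (by decide) (by norm_num)),
        chunk2 (Int.ofNat N) _ (and15_lt _)
          (e_pos N 8 ((4 * (2 : Int)).toNat) 0 (by norm_num) (by decide) (by norm_num))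
          (e_pos N 9 ((4 * (2 : Int)).toNat) 1 (by norm_num) (by decide) (by norm_num))
          (e_pos N 10 ((4 * (2 : Int)).toNat) 2 (by norm_num) (by decide) (by norm_num))
          (e_pos N 11 ((4 * (2 : Int)).toNat) 3 (by norm_num) (by decide) (by norm_num)),
        chunk3 (Int.ofNat N) _ (and15_lt _)
          (e_pos N 12 ((4 * (3 : Int)).toNat) 0 (by norm_num) (by decide) (by norm_num))
          (e_pos N 13 ((4 * (3 : Int)).toNat) 1 (by norm_num) (by decide) (by norm_num))
          (e_pos N 14 ((4 * (3 : Int)).toNat) 2 (by norm_num) (by decide) (by norm_num))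
          (e_pos N 15 ((4 * (3 : Int)).toNat) 3 (by norm_num) (by decide) (by norm_num))]
    simp only [List.foldl_cons, List.foldl_nil]
    simp only [nib_pos]
  | negSucc N =>
    rw [chunk0 (Int.negSucc N) _ (and15_lt _)
          (e_neg N 0 ((4 * (0 : Int)).toNat) 0 (by norm_num) (by decide) (by norm_num))
          (e_neg N 1 ((4 * (0 : Int)).toNat) 1 (by norm_num) (by decide) (by norm_num))
          (e_neg N 2 ((4 * (0 : Int)).toNat) 2 (by norm_num) (by decide) (by norm_num))
          (e_neg N 3 ((4 * (0 : Int)).toNat) 3 (by norm_num) (by decide) (by norm_num)),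
        chunk1 (Int.negSucc N) _ (and15_lt _)
          (e_neg N 4 ((4 * (1 : Int)).toNat) 0 (by norm_num) (by decide) (by norm_num))
          (e_neg N 5 ((4 * (1 : Int)).toNat) 1 (by norm_num) (by decide) (by norm_num))
          (e_neg N 6 ((4 * (1 : Int)).toNat) 2 (by norm_num) (by decide) (by norm_num))
          (e_neg N 7 ((4 * (1 : Int)).toNat) 3 (by norm_num) (by decide) (by norm_num)),
        chunk2 (Int.negSucc N) _ (and15_lt _)
          (e_neg N 8 ((4 * (2 : Int)).toNat) 0 (by norm_num) (by decide) (by norm_num))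
          (e_neg N 9 ((4 * (2 : Int)).toNat) 1 (by norm_num) (by decide) (by norm_num))
          (e_neg N 10 ((4 * (2 : Int)).toNat) 2 (by norm_num) (by decide) (by norm_num))
          (e_neg N 11 ((4 * (2 : Int)).toNat) 3 (by norm_num) (by decide) (by norm_num)),
        chunk3 (Int.negSucc N) _ (and15_lt _)
          (e_neg N 12 ((4 * (3 : Int)).toNat) 0 (by norm_num) (by decide) (by norm_num))
          (e_neg N 13 ((4 * (3 : Int)).toNat) 1 (by norm_num) (by decide) (by norm_num))
          (e_neg N 14 ((4 * (3 : Int)).toNat) 2 (by norm_num) (by decide) (by norm_num))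
          (e_neg N 15 ((4 * (3 : Int)).toNat) 3 (by norm_num) (by decide) (by norm_num))]
    simp only [List.foldl_cons, List.foldl_nil]
    simp only [nib_neg]

-- ===== VERDICT (by name: the statement is the Claim_ definition above) =====
theorem hex_to_time_slots_spec : Claim_equal_hex_to_time_slots := by
  intro s _
  unfold Spec_hex_to_time_slots hex_to_time_slots hex_to_time_slots_alt
  split
  · rfl
  · cases PySem.Int.ofStrBase? s 16 with
    | none => rfl
    | some value => exact core_eq value
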